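-- pv_equiv track=rewrite | github.com/At1X/Exercises | Homework_1/Question_5.py | IUT_base_operator
-- ===== SOURCE A (Python) =====
-- def IUT_base_operator(num, base):
--     if num == 0:
--         return '0'
--     digits = ''
--     while num:
--         digits += str(int(num % base))
--         num //= base
--     return digits[::-1]
-- ===== SOURCE B (Python) =====
-- # Standard recursive base conversion: build the string most-significant-digit
-- # first, so no accumulator and no final reversal are needed.
-- def IUT_base_operator(num, base):
--     if num == 0:
--         return '0'
--     def convert(n):
--         if n == 0:
--             return ''
--         return convert(n // base) + str(n % base)
--     return convert(num)
-- ===== Notes on version B (the rewrite author's own statement) =====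
-- stated objective: simpler
-- what changed: Replaces the while-loop that accumulates digits least-significant-first into a string and reverses it at the end with the textbook recursion convert(n) = convert(n // base) + str(n % base), which emits digits most-significant-first with no accumulator and no reversal; …
-- outside the precondition, e.g. on IUT_base_operator(12, 16): A returns '21', B returns '12'; on IUT_base_operator(5, -2): A returns '1-1-1-1-', B returns '-1-1-1-1'
import Mathlib
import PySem

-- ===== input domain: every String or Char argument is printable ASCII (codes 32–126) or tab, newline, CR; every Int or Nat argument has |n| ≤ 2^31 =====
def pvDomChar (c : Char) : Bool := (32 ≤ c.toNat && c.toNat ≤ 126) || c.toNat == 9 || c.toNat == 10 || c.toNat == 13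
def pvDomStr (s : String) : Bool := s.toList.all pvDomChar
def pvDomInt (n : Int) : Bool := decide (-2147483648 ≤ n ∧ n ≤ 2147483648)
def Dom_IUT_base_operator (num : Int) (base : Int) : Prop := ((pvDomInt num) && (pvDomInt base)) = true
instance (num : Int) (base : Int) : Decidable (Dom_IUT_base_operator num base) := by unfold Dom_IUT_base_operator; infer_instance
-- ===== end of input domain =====

-- B replaces A's accumulate-LSB-first-then-reverse while-loop by the textbook
-- most-significant-first recursion (no accumulator, no reversal); equality proved on Pre_.

-- ===== PORT A =====
-- A's while loop; fuel only makes the Lean function total (inside Pre_ the loop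
-- stops long before the fuel runs out; outside Pre_ nothing is claimed)
def pvALoop (base : Int) : Nat → Int → String → String
  | 0, _, digits => digits
  | fuel+1, num, digits =>
    if num = 0 then digits
    else pvALoop base fuel (PySem.Int.floordiv num base)
          (digits ++ PySem.Int.toStr (PySem.Int.mod num base))

def IUT_base_operator (num : Int) (base : Int) : String :=
  if num = 0 then "0"
  else (PySem.Str.slice? (pvALoop base (2 * num.natAbs + 3) num "") none none (-1)).getD ""

-- ===== PORT B =====
-- Source B's convert.  On Pre_ (num ≥ 1, 2 ≤ base ≤ 10) every value the recursion
-- touches is non-negative and Python's // and % coincide with Nat division, so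
-- the recursion lives on Nat and terminates structurally (n / b < n); the
-- 'b ≤ 1' disjunct is only a totality guard for the well-founded recursion.
def pvConvert (b : Nat) (n : Nat) : String :=
  if n = 0 ∨ b ≤ 1 then ""
  else pvConvert b (n / b) ++ PySem.Int.toStr ((n % b : Nat) : Int)
termination_by n
decreasing_by exact Nat.div_lt_self (by omega) (by omega)

def IUT_base_operator_alt (num : Int) (base : Int) : String :=
  if num = 0 then "0" else pvConvert base.toNat num.toNat

-- ===== PRECONDITION & SPEC =====
-- Pre_ keeps the natural domain of digit bases: num = 0, or num ≥ 1 with 2 ≤ base ≤ 10.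
-- Excluded: base 0 (A raises ZeroDivisionError), base 1 and negative num (A's loop never
-- terminates), and bases > 10 or ≤ -2, where a digit's str() rendering has several
-- characters (e.g. '12', '-1') and A's whole-string reversal interleaves them — a corner
-- no caller could rely on; B returns the plain most-significant-first concatenation there.
-- Single-digit numbers 1 ≤ num ≤ 9 < base stay inside Pre_ for any base (one character,
-- nothing to interleave).
def Pre_IUT_base_operator (num : Int) (base : Int) : Prop :=
  num = 0 ∨ (1 ≤ num ∧ 2 ≤ base ∧ base ≤ 10) ∨ (1 ≤ num ∧ num ≤ 9 ∧ num < base)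
instance (num : Int) (base : Int) : Decidable (Pre_IUT_base_operator num base) := by
  unfold Pre_IUT_base_operator; infer_instance

def pvWitness_IUT_base_operator : Int × Int := (10, 2)

def Spec_IUT_base_operator (num : Int) (base : Int) (out : String) : Prop := out = IUT_base_operator_alt num base
instance (num : Int) (base : Int) (out : String) : Decidable (Spec_IUT_base_operator num base out) := by unfold Spec_IUT_base_operator; infer_instance

-- ===== CLAIM (what is proved, stated in full; the proofs are below) =====
def Claim_equal_IUT_base_operator : Prop := ∀ (num : Int) (base : Int), Dom_IUT_base_operator num base → Pre_IUT_base_operator num base → Spec_IUT_base_operator num base (IUT_base_operator num base)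

-- ===== LEMMAS AND PROOFS =====

-- accumulator homomorphism for A's loop
theorem pvALoop_acc (base : Int) (fuel : Nat) :
    ∀ (n : Int) (acc : String), pvALoop base fuel n acc = acc ++ pvALoop base fuel n "" := by
  induction fuel with
  | zero => intro n acc; simp [pvALoop]
  | succ f ih =>
    intro n acc
    by_cases h : n = 0
    · simp [pvALoop, h]
    · simp only [pvALoop, if_neg h]
      rw [ih, ih (PySem.Int.floordiv n base) ("" ++ PySem.Int.toStr (PySem.Int.mod n base))]
      simp [String.append_assoc]

-- a single decimal digit's rendering is one character, hence its own reverse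
theorem toStr_digit_rev (d : Nat) (hd : d < 10) :
    (PySem.Int.toStr (d : Int)).toList.reverse = (PySem.Int.toStr (d : Int)).toList := by
  interval_cases d <;> decide

-- reversing A's accumulated digit string gives B's recursion (digit bases, n nonneg)
theorem pvALoop_rev (b : Nat) (hb2 : 2 ≤ b) (hb10 : b ≤ 10) :
    ∀ (fuel n : Nat), n < fuel →
      (pvALoop (b : Int) fuel (n : Int) "").toList.reverse = (pvConvert b n).toList := by
  intro fuel
  induction fuel with
  | zero => intro n h; omega
  | succ f ih =>
    intro n hn
    by_cases h : n = 0
    · subst h; simp [pvALoop, pvConvert]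
    · have hn0 : (n : Int) ≠ 0 := by exact_mod_cast h
      have hguard : ¬ (n = 0 ∨ b ≤ 1) := by omega
      have hdiv : n / b < f := by
        have hx : n / b < n := Nat.div_lt_self (Nat.pos_of_ne_zero h) (show 1 < b by omega)
        omega
      simp only [pvALoop, if_neg hn0]
      rw [pvALoop_acc, PySem.Int.floordiv_natCast, PySem.Int.mod_natCast]
      conv_rhs => rw [pvConvert, if_neg hguard]
      simp only [String.toList_append, List.reverse_append]
      rw [ih (n / b) hdiv, toStr_digit_rev (n % b) (lt_of_lt_of_le (Nat.mod_lt n (by omega)) hb10)]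
      simp

-- one loop iteration when 1 ≤ n < b: A's loop emits exactly str(n)
theorem pvALoop_single (b n f : Nat) (h1 : 1 ≤ n) (hlt : n < b) :
    pvALoop (b : Int) (f + 2) (n : Int) "" = PySem.Int.toStr (n : Int) := by
  have hn0 : (n : Int) ≠ 0 := by exact_mod_cast Nat.one_le_iff_ne_zero.mp h1
  simp only [pvALoop, if_neg hn0]
  rw [PySem.Int.floordiv_natCast, PySem.Int.mod_natCast,
      Nat.div_eq_of_lt hlt, Nat.mod_eq_of_lt hlt]
  norm_num [pvALoop]

-- one recursion step when 1 ≤ n < b: B emits exactly str(n)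
theorem pvConvert_single (b n : Nat) (h1 : 1 ≤ n) (hlt : n < b) :
    pvConvert b n = PySem.Int.toStr ((n : Nat) : Int) := by
  rw [pvConvert, if_neg (by omega), Nat.div_eq_of_lt hlt, Nat.mod_eq_of_lt hlt, pvConvert]
  simp

-- ===== VERDICT (by name: the statement is the Claim_ definition above) =====
theorem IUT_base_operator_spec : Claim_equal_IUT_base_operator := by
  intro num base _ hpre
  unfold Spec_IUT_base_operator IUT_base_operator IUT_base_operator_alt
  rcases hpre with h0 | ⟨hn, hb2, hb10⟩ | ⟨hn, h9, hlt⟩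
  · simp [h0]
  · have hne : num ≠ 0 := by omega
    rw [if_neg hne, if_neg hne, PySem.Str.slice?_none_none_neg_one]
    apply String.ext
    have hnum : ((num.toNat : Nat) : Int) = num := Int.toNat_of_nonneg (by omega)
    have hbase : ((base.toNat : Nat) : Int) = base := Int.toNat_of_nonneg (by omega)
    have hfuel : num.toNat < 2 * num.natAbs + 3 := by omega
    have := pvALoop_rev base.toNat (by omega) (by omega) (2 * num.natAbs + 3) num.toNat hfuel
    rw [hnum, hbase] at this
    simpa using this
  · have hne : num ≠ 0 := by omega
    rw [if_neg hne, if_neg hne, PySem.Str.slice?_none_none_neg_one]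
    have hnum : ((num.toNat : Nat) : Int) = num := Int.toNat_of_nonneg (by omega)
    have hbase : ((base.toNat : Nat) : Int) = base := Int.toNat_of_nonneg (by omega)
    have h32 : 2 * num.natAbs + 3 = 2 * num.natAbs + 1 + 2 := rfl
    have hlt' : num.toNat < base.toNat := by omega
    have hA := pvALoop_single base.toNat num.toNat (2 * num.natAbs + 1) (by omega) hlt'
    rw [hnum, hbase] at hA
    rw [pvConvert_single base.toNat num.toNat (by omega) hlt', hnum, h32, hA]
    apply String.ext
    have hd := toStr_digit_rev num.toNat (by omega)
    rw [hnum] at hd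
    simpa using hd
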